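-- pv_equiv track=rewrite | github.com/tcarobruce/adventofcode | 2023/p14.py | tilt_right
-- ===== SOURCE A (Python) =====
-- def tilt_right(row):
--     rounds = 0
--     tilted = []
--     for i, c in enumerate(row):
--         if c == "O":
--             rounds += 1
--             c = "."
--         elif c == "#":
--             for j in range(rounds):
--                 tilted[i - j - 1] = "O"
--             rounds = 0
--         tilted.append(c)
--     for j in range(rounds):
--         tilted[len(tilted) - j - 1] = "O"
--     return "".join(tilted)
-- ===== SOURCE B (Python) =====
-- def tilt_right(row):
--     parts = []
--     for seg in row.split("#"):
--         k = seg.count("O")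
--         dotted = seg.replace("O", ".")
--         parts.append(dotted[:len(seg) - k] + "O" * k)
--     return "#".join(parts)
-- ===== Notes on version B (the rewrite author's own statement) =====
-- stated objective: simpler
-- what changed: Replaced A's streaming pass with an in-place back-fill counter (overwriting the last k cells at each wall and at the end) by splitting the row on walls, rebuilding each segment as dotted-prefix plus trailing rocks, and rejoining.
import Mathlib
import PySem

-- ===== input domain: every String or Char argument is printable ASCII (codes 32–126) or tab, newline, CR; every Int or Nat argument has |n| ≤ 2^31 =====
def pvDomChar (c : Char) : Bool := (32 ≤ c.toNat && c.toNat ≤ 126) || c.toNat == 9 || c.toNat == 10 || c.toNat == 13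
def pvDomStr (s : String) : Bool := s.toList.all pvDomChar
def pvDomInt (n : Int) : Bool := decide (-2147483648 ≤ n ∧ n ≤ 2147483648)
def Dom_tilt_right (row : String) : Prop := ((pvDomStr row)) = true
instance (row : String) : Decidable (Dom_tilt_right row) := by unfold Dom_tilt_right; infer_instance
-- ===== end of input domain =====

-- B replaces A's streaming back-fill counter by split-on-'#' / fix-each-segment / rejoin (objective: simpler).

-- ===== PORT A =====
-- the inner 'for j in range(rounds): tilted[i-j-1] = "O"' loop (index always in range in any run)
def pvSetRun (tilted : List Char) (i : Int) (rounds : Int) : List Char :=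
  (PySem.List.pyRange 0 rounds 1).foldl (fun t j => PySem.List.pySetD t (i - j - 1) 'O') tilted

def pvTiltStep (s : Int × List Char) (ic : Int × Char) : Int × List Char :=
  match s, ic with
  | (rounds, tilted), (i, c) =>
    if c = 'O' then (rounds + 1, tilted ++ ['.'])
    else if c = '#' then (0, pvSetRun tilted i rounds ++ ['#'])
    else (rounds, tilted ++ [c])

def tilt_right (row : String) : String :=
  match (PySem.List.enumerate row.toList).foldl pvTiltStep (0, []) with
  | (rounds, tilted) => String.mk (pvSetRun tilted (tilted.length : Int) rounds)

-- ===== PORT B =====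
-- per-segment fix: dotted[:len(seg)-k] + "O"*k
def pvFixB (seg : List Char) : List Char :=
  let k := PySem.Chars.count seg ['O']
  let dotted := PySem.Chars.replace seg ['O'] ['.']
  PySem.Chars.slice dotted none (some ((seg.length : Int) - (k : Int))) ++ List.replicate k 'O'

def tilt_right_alt (row : String) : String :=
  String.mk (PySem.Chars.join ['#'] ((PySem.Chars.splitOn row.toList ['#']).map pvFixB))

-- ===== PRECONDITION & SPEC =====
def Spec_tilt_right (row : String) (out : String) : Prop := out = tilt_right_alt row
instance (row : String) (out : String) : Decidable (Spec_tilt_right row out) := by unfold Spec_tilt_right; infer_instance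

-- ===== CLAIM (what is proved, stated in full; the proofs are below) =====
def Claim_equal_tilt_right : Prop := ∀ (row : String), Dom_tilt_right row → Spec_tilt_right row (tilt_right row)

-- ===== LEMMAS AND PROOFS =====

-- spec-side vocabulary
def pvDot (c : Char) : Char := if c = 'O' then '.' else c

def pvFixSeg (seg : List Char) : List Char :=
  (seg.map pvDot).take (seg.length - seg.count 'O') ++ List.replicate (seg.count 'O') 'O'

-- common recursive characterization of both ports
def pvG : List Char → List Char → List Char
  | pend, [] => pvFixSeg pend
  | pend, c :: cs => if c = '#' then pvFixSeg pend ++ '#' :: pvG [] cs else pvG (pend ++ [c]) cs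

-- structural split on '#'
def pvSplit : List Char → List (List Char)
  | [] => [[]]
  | c :: rest =>
    if c = '#' then [] :: pvSplit rest
    else match pvSplit rest with
      | s :: ss => (c :: s) :: ss
      | [] => [[c]]

def pvFinish (s : Int × List Char) : List Char := pvSetRun s.2 (s.2.length : Int) s.1

lemma pvSplit_cons_exists (l : List Char) : ∃ s ss, pvSplit l = s :: ss := by
  cases l with
  | nil => exact ⟨[], [], rfl⟩
  | cons c rest =>
    by_cases h : c = '#'
    · exact ⟨[], pvSplit rest, by simp [pvSplit, h]⟩
    · rcases hs : pvSplit rest with _ | ⟨s, ss⟩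
      · exact ⟨[c], [], by simp [pvSplit, h, hs]⟩
      · exact ⟨c :: s, ss, by simp [pvSplit, h, hs]⟩

lemma pvCount_go (l : List Char) : ∀ (fuel acc : Nat), l.length ≤ fuel →
    PySem.Chars.count.go ['O'] fuel l acc = acc + l.count 'O' := by
  induction l with
  | nil =>
    intro fuel acc _
    cases fuel <;> simp [PySem.Chars.count.go]
  | cons c t ih =>
    intro fuel acc hf
    cases fuel with
    | zero => simp at hf
    | succ f =>
      by_cases h : c = 'O'
      · simp [PySem.Chars.count.go, h, List.isPrefixOf, ih f (acc + 1) (by simpa using hf)]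
        omega
      · simp [PySem.Chars.count.go, List.isPrefixOf, h, ih f acc (by simpa using hf), Ne.symm h]

lemma pvCount_eq (l : List Char) : PySem.Chars.count l ['O'] = l.count 'O' := by
  simp [PySem.Chars.count, pvCount_go l l.length 0 le_rfl]

lemma pvReplace_go (l : List Char) : ∀ (fuel : Nat) (acc : List Char), l.length ≤ fuel →
    PySem.Chars.replace.go ['O'] ['.'] fuel l acc = acc.reverse ++ l.map pvDot := by
  induction l with
  | nil =>
    intro fuel acc _
    cases fuel <;> simp [PySem.Chars.replace.go]
  | cons c t ih =>
    intro fuel acc hf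
    cases fuel with
    | zero => simp at hf
    | succ f =>
      by_cases h : c = 'O'
      · simp [PySem.Chars.replace.go, h, List.isPrefixOf, ih f ('.' :: acc) (by simpa using hf),
          pvDot]
      · simp [PySem.Chars.replace.go, List.isPrefixOf, h, Ne.symm h,
          ih f (c :: acc) (by simpa using hf), pvDot]

lemma pvReplace_eq (l : List Char) : PySem.Chars.replace l ['O'] ['.'] = l.map pvDot := by
  simp [PySem.Chars.replace, pvReplace_go l l.length [] le_rfl]

lemma pvSplit_go (l : List Char) : ∀ (fuel : Nat) (cur : List Char) (acc : List (List Char)),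
    l.length ≤ fuel →
    PySem.Chars.splitOn.go ['#'] fuel l cur acc
      = acc.reverse ++ List.modifyHead (cur.reverse ++ ·) (pvSplit l) := by
  induction l with
  | nil =>
    intro fuel cur acc _
    cases fuel <;> simp [PySem.Chars.splitOn.go, pvSplit]
  | cons c t ih =>
    intro fuel cur acc hf
    cases fuel with
    | zero => simp at hf
    | succ f =>
      by_cases h : c = '#'
      · rcases pvSplit_cons_exists t with ⟨s, ss, hs⟩
        simp [PySem.Chars.splitOn.go, h, List.isPrefixOf, ih f [] (cur.reverse :: acc) (by simpa using hf),
          pvSplit, hs]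
      · rcases hs : pvSplit t with _ | ⟨s, ss⟩
        · exact absurd hs (by rcases pvSplit_cons_exists t with ⟨s, ss, h'⟩; simp [h'])
        · simp [PySem.Chars.splitOn.go, List.isPrefixOf, h, Ne.symm h,
            ih f (c :: cur) acc (by simpa using hf), pvSplit, hs]

lemma pvSplit_eq (l : List Char) : PySem.Chars.splitOn l ['#'] = pvSplit l := by
  rcases pvSplit_cons_exists l with ⟨s, ss, hs⟩
  simp [PySem.Chars.splitOn, pvSplit_go l (l.length + 1) [] [] (by omega), hs]

lemma pvFixB_eq (seg : List Char) : pvFixB seg = pvFixSeg seg := by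
  have hk : seg.count 'O' ≤ seg.length := List.count_le_length
  show PySem.Chars.slice _ none _ ++ _ = _
  rw [pvCount_eq, pvReplace_eq, PySem.Chars.slice_eq_listSlice,
    PySem.List.slice_to _ (by omega)]
  unfold pvFixSeg
  congr 2
  omega

lemma pvFixSeg_length (seg : List Char) : (pvFixSeg seg).length = seg.length := by
  have hk : seg.count 'O' ≤ seg.length := List.count_le_length
  simp [pvFixSeg]
  omega

lemma pvB_join (cs : List Char) : ∀ (pend : List Char),
    PySem.Chars.join ['#'] ((List.modifyHead (pend ++ ·) (pvSplit cs)).map pvFixB)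
      = pvG pend cs := by
  induction cs with
  | nil =>
    intro pend
    simp [pvSplit, pvG, pvFixB_eq, PySem.Chars.join_singleton]
  | cons c rest ih =>
    intro pend
    rcases hs : pvSplit rest with _ | ⟨s, ss⟩
    · exact absurd hs (by rcases pvSplit_cons_exists rest with ⟨s, ss, h'⟩; simp [h'])
    by_cases h : c = '#'
    · have ihe := ih []
      rw [hs] at ihe
      simp only [List.modifyHead_cons, List.nil_append] at ihe
      cases ss with
      | nil =>
        simp [pvSplit, h, hs, pvG, pvFixB_eq, PySem.Chars.join_singleton,
          PySem.Chars.join_cons_cons] at ihe ⊢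
        rw [ihe]
      | cons q qs =>
        simp [pvSplit, h, hs, pvG, pvFixB_eq, PySem.Chars.join_cons_cons] at ihe ⊢
        rw [ihe]
    · have ihe := ih (pend ++ [c])
      rw [hs] at ihe
      simp only [List.modifyHead_cons, List.append_assoc, List.singleton_append] at ihe
      simp [pvSplit, h, hs, pvG]
      simpa using ihe

lemma pvSetRun_eq (t : List Char) (r : Nat) (h : r ≤ t.length) :
    pvSetRun t (t.length : Int) (r : Int) = t.take (t.length - r) ++ List.replicate r 'O' := by
  induction r with
  | zero => simp [pvSetRun]
  | succ n ih =>
    have ih' := ih (by omega)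
    unfold pvSetRun at ih' ⊢
    rw [PySem.List.pyRange_zero_nat] at ih' ⊢
    rw [List.range_succ, List.map_append, List.foldl_append, ih']
    simp only [List.map_cons, List.map_nil, List.foldl_cons, List.foldl_nil]
    have hidx : ((t.length : Int) - (n : Int) - 1) = (((t.length - n - 1 : Nat)) : Int) := by omega
    rw [hidx, PySem.List.pySetD_natCast]
    rw [List.set_eq_take_append_cons_drop]
    have hlt : t.length - n - 1 < (List.take (t.length - n) t ++ List.replicate n 'O').length := by
      simp; omega
    rw [if_pos hlt]
    rw [List.take_append, List.drop_append]
    have h1 : t.length - n - 1 ≤ (List.take (t.length - n) t).length := by simp only [List.length_take]; omega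
    have pvaux : (List.take (t.length - n) t).length ≤ t.length - n - 1 + 1 := by simp only [List.length_take]; omega
    rw [List.take_take, List.drop_eq_nil_of_le pvaux]
    simp only [List.length_take]
    have h2 : min (t.length - n - 1) (min (t.length - n) t.length) = t.length - n - 1 := by omega
    have h3 : t.length - n - 1 - min (t.length - n) t.length = 0 := by omega
    have h4 : t.length - n - 1 + 1 - min (t.length - n) t.length = 0 := by omega
    rw [h3, h4]
    simp only [List.replicate_succ]
    simp only [List.nil_append]
    congr 2
    simp only [List.take_zero, List.append_nil]
    congr 1
    omega

lemma pvSetRun_done (done p : List Char) (r : Nat) (h : r ≤ p.length) :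
    pvSetRun (done ++ p) (((done ++ p).length : Nat) : Int) (r : Int)
      = done ++ (p.take (p.length - r) ++ List.replicate r 'O') := by
  rw [pvSetRun_eq _ _ (by simp; omega)]
  rw [List.take_append, List.take_of_length_le (by simp; omega)]
  simp only [List.length_append]
  have : done.length + p.length - r - done.length = p.length - r := by omega
  rw [this, List.append_assoc]

lemma pvLoopA (cs : List Char) : ∀ (pend done : List Char),
    pvFinish ((PySem.List.enumerate cs ((done.length + pend.length : Nat) : Int)).foldl pvTiltStep
        ((pend.count 'O' : Int), done ++ pend.map pvDot))
      = done ++ pvG pend cs := by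
  induction cs with
  | nil =>
    intro pend done
    have hc : pend.count 'O' ≤ (pend.map pvDot).length := by
      simp [List.length_map]; exact List.count_le_length
    simp only [PySem.List.enumerate, List.foldl_nil, pvFinish]
    have := pvSetRun_done done (pend.map pvDot) (pend.count 'O') hc
    simp only [List.length_append, List.length_map] at this ⊢
    rw [this]
    simp [pvG, pvFixSeg]
  | cons c cs ih =>
    intro pend done
    rw [show PySem.List.enumerate (c :: cs) ((done.length + pend.length : Nat) : Int)
        = (((done.length + pend.length : Nat) : Int), c)
          :: PySem.List.enumerate cs (((done.length + pend.length : Nat) : Int) + 1) from by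
      simp [PySem.List.enumerate]]
    rw [List.foldl_cons]
    by_cases hO : c = 'O'
    · have step : pvTiltStep ((pend.count 'O' : Int), done ++ pend.map pvDot)
          (((done.length + pend.length : Nat) : Int), c)
          = (((pend ++ [c]).count 'O' : Int), done ++ (pend ++ [c]).map pvDot) := by
        simp [pvTiltStep, hO, List.count_append, pvDot]
        try push_cast
        try ring
      rw [step]
      have := ih (pend ++ [c]) done
      simp only [List.length_append, List.length_cons, List.length_nil] at this ⊢
      rw [show ((done.length + pend.length : Nat) : Int) + 1
          = ((done.length + (pend.length + (0 + 1)) : Nat) : Int) from by push_cast; ring] at *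
      rw [this]
      simp [pvG, hO]
    · by_cases hH : c = '#'
      · have hc : pend.count 'O' ≤ (pend.map pvDot).length := by
          simp [List.length_map]; exact List.count_le_length
        have step : pvTiltStep ((pend.count 'O' : Int), done ++ pend.map pvDot)
            (((done.length + pend.length : Nat) : Int), c)
            = (0, (done ++ pvFixSeg pend) ++ ['#']) := by
          simp only [pvTiltStep, if_neg hO]
          have h1 : ((done.length + pend.length : Nat) : Int)
              = (((done ++ pend.map pvDot).length : Nat) : Int) := by
            simp [List.length_append, List.length_map]
          rw [if_pos hH, h1,
            pvSetRun_done done (pend.map pvDot) (pend.count 'O') hc]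
          simp [pvFixSeg, List.length_map, List.append_assoc]
        rw [step]
        have := ih [] ((done ++ pvFixSeg pend) ++ ['#'])
        simp only [List.map_nil, List.append_nil, List.count_nil, Nat.cast_zero,
          List.length_append, List.length_cons, List.length_nil, pvFixSeg_length] at this
        rw [show ((done.length + pend.length : Nat) : Int) + 1
            = ((done.length + pend.length + 1 + 0 : Nat) : Int) from by push_cast; ring]
        rw [this]
        simp [pvG, hH, List.append_assoc]
      · have step : pvTiltStep ((pend.count 'O' : Int), done ++ pend.map pvDot)
            (((done.length + pend.length : Nat) : Int), c)
            = (((pend ++ [c]).count 'O' : Int), done ++ (pend ++ [c]).map pvDot) := by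
          simp [pvTiltStep, hO, hH, List.count_append, pvDot]
        rw [step]
        have := ih (pend ++ [c]) done
        simp only [List.length_append, List.length_cons, List.length_nil] at this ⊢
        rw [show ((done.length + pend.length : Nat) : Int) + 1
            = ((done.length + (pend.length + (0 + 1)) : Nat) : Int) from by push_cast; ring] at *
        rw [this]
        simp [pvG, hH]

lemma pvA_eq (row : String) : tilt_right row = String.mk (pvG [] row.toList) := by
  have h := pvLoopA row.toList [] []
  simp only [List.count_nil, Nat.cast_zero, List.map_nil, List.append_nil, List.length_nil,
    List.nil_append, Nat.add_zero] at h
  unfold tilt_right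
  rcases hf : (PySem.List.enumerate row.toList).foldl pvTiltStep (0, []) with ⟨r, t⟩
  rw [hf] at h
  simp only [pvFinish] at h
  show String.mk (pvSetRun t (t.length : Int) r) = _
  rw [h]

lemma pvB_eq (row : String) : tilt_right_alt row = String.mk (pvG [] row.toList) := by
  unfold tilt_right_alt
  rw [pvSplit_eq]
  rcases hs : pvSplit row.toList with _ | ⟨s, ss⟩
  · exact absurd hs (by rcases pvSplit_cons_exists row.toList with ⟨s, ss, h'⟩; simp [h'])
  · have h := pvB_join row.toList []
    rw [hs] at h
    simp only [List.modifyHead_cons, List.nil_append] at h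
    rw [h]

-- ===== VERDICT (by name: the statement is the Claim_ definition above) =====
theorem tilt_right_spec : Claim_equal_tilt_right := by
  intro row _
  unfold Spec_tilt_right
  rw [pvA_eq, pvB_eq]
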